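-- pv_equiv track=rewrite | github.com/michaelayoade/dotmac_framework | management-platform/src/mgmt/services/saas_monitoring/service.py | _determine_external_overall_status
-- ===== SOURCE A (Python) =====
-- from typing import Dict, List, Optional, Any, Tuple
--
-- def _determine_external_overall_status(external_reports: Dict[str, Dict[str, Any]]) -> str:
--     """Determine overall status from external component reports."""
--     if not external_reports:
--         return "unknown"
--
--     statuses = [report["status"] for report in external_reports.values()]
--
--     # Priority: unhealthy > warning > healthy
--     if "unhealthy" in statuses:
--         return "unhealthy"
--     elif "warning" in statuses:
--         return "warning"
--     elif "healthy" in statuses: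
--         return "healthy"
--     else:
--         return "unknown"
-- ===== SOURCE B (Python) =====
-- def _determine_external_overall_status(external_reports):
--     """Determine overall status from external component reports."""
--     priority = {"unhealthy": 0, "warning": 1, "healthy": 2}
--     best = min(
--         (priority.get(report["status"], 3) for report in external_reports.values()),
--         default=3,
--     )
--     return ("unhealthy", "warning", "healthy", "unknown")[best]
-- ===== Notes on version B (the rewrite author's own statement) =====
-- stated objective: idiomatic
-- what changed: Replaced the materialised status list plus a three-way membership if/elif chain (up to three scans) by a single min-fold over priority ranks indexing a rank table, with the empty case handled by min's default instead of an early return.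
import Mathlib
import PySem

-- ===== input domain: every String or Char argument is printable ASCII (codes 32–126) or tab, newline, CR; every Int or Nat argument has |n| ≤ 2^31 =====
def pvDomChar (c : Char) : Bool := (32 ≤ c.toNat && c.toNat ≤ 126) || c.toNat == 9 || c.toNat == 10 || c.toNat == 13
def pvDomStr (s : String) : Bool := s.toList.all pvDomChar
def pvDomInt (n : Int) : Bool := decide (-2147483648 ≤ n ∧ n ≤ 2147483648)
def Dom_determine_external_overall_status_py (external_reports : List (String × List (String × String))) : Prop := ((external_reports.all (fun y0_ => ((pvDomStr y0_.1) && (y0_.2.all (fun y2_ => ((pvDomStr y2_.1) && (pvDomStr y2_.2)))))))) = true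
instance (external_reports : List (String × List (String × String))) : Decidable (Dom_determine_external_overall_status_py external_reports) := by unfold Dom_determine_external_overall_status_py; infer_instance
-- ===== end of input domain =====

-- B replaces the status-list + membership if/elif chain by one min-fold over priority
-- ranks and a table lookup (idiomatic single pass; same O(n) cost).

-- ===== PORT A =====
def determine_external_overall_status_py (external_reports : List (String × List (String × String))) : String :=
  if external_reports = [] then "unknown"
  else
    -- statuses = [report["status"] for report in external_reports.values()]
    let statuses := external_reports.map (fun kv => PySem.Dict.get? ⟨kv.2⟩ "status")
    if some "unhealthy" ∈ statuses then "unhealthy"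
    else if some "warning" ∈ statuses then "warning"
    else if some "healthy" ∈ statuses then "healthy"
    else "unknown"

-- ===== PORT B =====
-- priority.get(s, 3) for the literal dict {"unhealthy":0, "warning":1, "healthy":2}
def pvRank (s : Option String) : Int :=
  if s = some "unhealthy" then 0
  else if s = some "warning" then 1
  else if s = some "healthy" then 2
  else 3

def determine_external_overall_status_py_alt (external_reports : List (String × List (String × String))) : String :=
  -- min(generator, default=3) is exactly a min-fold with initial accumulator 3
  let best := (external_reports.map (fun kv => pvRank (PySem.Dict.get? ⟨kv.2⟩ "status"))).foldl min 3
  -- tuple indexing; best ∈ [0,3] always, getD is only a totality guard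
  (PySem.List.pyGet? ["unhealthy", "warning", "healthy", "unknown"] best).getD "unknown"

-- ===== PRECONDITION & SPEC =====
-- Pre_ excludes exactly the inputs where some report lacks a "status" key: there both
-- Pythons raise KeyError.
def Pre_determine_external_overall_status_py (external_reports : List (String × List (String × String))) : Prop :=
  external_reports.all (fun kv => kv.2.any (fun p => p.1 == "status")) = true
instance (external_reports : List (String × List (String × String))) : Decidable (Pre_determine_external_overall_status_py external_reports) := by unfold Pre_determine_external_overall_status_py; infer_instance

def pvWitness_determine_external_overall_status_py : (List (String × List (String × String))) :=
  [("svc", [("status", "healthy")]), ("db", [("status", "warning")])]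

def Spec_determine_external_overall_status_py (external_reports : List (String × List (String × String))) (out : String) : Prop := out = determine_external_overall_status_py_alt external_reports
instance (external_reports : List (String × List (String × String))) (out : String) : Decidable (Spec_determine_external_overall_status_py external_reports out) := by unfold Spec_determine_external_overall_status_py; infer_instance

-- ===== CLAIM (what is proved, stated in full; the proofs are below) =====
def Claim_equal_determine_external_overall_status_py : Prop := ∀ (external_reports : List (String × List (String × String))), Dom_determine_external_overall_status_py external_reports → Pre_determine_external_overall_status_py external_reports → Spec_determine_external_overall_status_py external_reports (determine_external_overall_status_py external_reports)

-- ===== LEMMAS AND PROOFS =====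

lemma foldl_min_acc (l : List Int) (a b : Int) :
    l.foldl min (min a b) = min a (l.foldl min b) := by
  induction l generalizing a b with
  | nil => simp [List.foldl]
  | cons x t ih =>
    simp only [List.foldl]
    rw [min_assoc, ih]

lemma minr_char (l : List (Option String)) :
    (l.map pvRank).foldl min 3 =
      (if some "unhealthy" ∈ l then (0 : Int)
       else if some "warning" ∈ l then 1
       else if some "healthy" ∈ l then 2
       else 3) := by
  induction l with
  | nil => simp
  | cons x t ih =>
    simp only [List.map, List.foldl, List.mem_cons]
    rw [min_comm, foldl_min_acc, ih, pvRank]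
    split_ifs <;> simp_all

theorem determine_external_overall_status_py_spec' (external_reports : List (String × List (String × String))) :
    determine_external_overall_status_py external_reports
      = determine_external_overall_status_py_alt external_reports := by
  unfold determine_external_overall_status_py determine_external_overall_status_py_alt
  rw [show (fun kv : String × List (String × String) => pvRank ((PySem.Dict.mk kv.2).get? "status"))
        = pvRank ∘ (fun kv : String × List (String × String) => (PySem.Dict.mk kv.2).get? "status") from rfl,
      ← List.map_map, minr_char]
  by_cases h0 : external_reports = []
  · simp [h0]
  · simp only [if_neg h0]
    split_ifs <;> rfl

-- ===== VERDICT (by name: the statement is the Claim_ definition above) =====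
theorem determine_external_overall_status_py_spec : Claim_equal_determine_external_overall_status_py := by
  intro er _ _
  exact determine_external_overall_status_py_spec' er
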